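-- pv_equiv track=rewrite | github.com/wbsg-uni-mannheim/PyDI | PyDI/fusion/analysis.py | _detect_dtype_conflicts
-- ===== SOURCE A (Python) =====
-- from typing import Dict, List, Any, Optional, Union
--
-- def _detect_dtype_conflicts(schemas: Dict[str, Dict], common_columns: set) -> Dict[str, Dict]:
--     """Detect data type conflicts in common columns."""
--     conflicts = {}
--
--     for col in common_columns:
--         dtypes = {}
--         for dataset_name, schema in schemas.items():
--             if col in schema['dtypes']:
--                 dtype_str = str(schema['dtypes'][col])
--                 dtypes[dataset_name] = dtype_str
--
--         # Check if there are different data types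
--         unique_dtypes = set(dtypes.values())
--         if len(unique_dtypes) > 1:
--             conflicts[col] = dtypes
--
--     return conflicts
-- ===== SOURCE B (Python) =====
-- def _detect_dtype_conflicts(schemas, common_columns):
--     """Detect data type conflicts in common columns (build an index once, then filter)."""
--     index = {}
--     for dataset_name, schema in schemas.items():
--         for col, dtype in schema.get('dtypes', {}).items():
--             index.setdefault(col, {})[dataset_name] = str(dtype)
--     conflicts = {}
--     for col in common_columns:
--         row = index.get(col, {})
--         if len(set(row.values())) > 1:
--             conflicts[col] = row
--     return conflicts
-- ===== Notes on version B (the rewrite author's own statement) =====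
-- stated objective: alternative
-- what changed: Instead of rescanning all schemas for every common column, B makes one pass over the schemas building a column -> {dataset: dtype} index, then a second pass over common_columns that filters the index rows with more than one distinct dtype.
import Mathlib
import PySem

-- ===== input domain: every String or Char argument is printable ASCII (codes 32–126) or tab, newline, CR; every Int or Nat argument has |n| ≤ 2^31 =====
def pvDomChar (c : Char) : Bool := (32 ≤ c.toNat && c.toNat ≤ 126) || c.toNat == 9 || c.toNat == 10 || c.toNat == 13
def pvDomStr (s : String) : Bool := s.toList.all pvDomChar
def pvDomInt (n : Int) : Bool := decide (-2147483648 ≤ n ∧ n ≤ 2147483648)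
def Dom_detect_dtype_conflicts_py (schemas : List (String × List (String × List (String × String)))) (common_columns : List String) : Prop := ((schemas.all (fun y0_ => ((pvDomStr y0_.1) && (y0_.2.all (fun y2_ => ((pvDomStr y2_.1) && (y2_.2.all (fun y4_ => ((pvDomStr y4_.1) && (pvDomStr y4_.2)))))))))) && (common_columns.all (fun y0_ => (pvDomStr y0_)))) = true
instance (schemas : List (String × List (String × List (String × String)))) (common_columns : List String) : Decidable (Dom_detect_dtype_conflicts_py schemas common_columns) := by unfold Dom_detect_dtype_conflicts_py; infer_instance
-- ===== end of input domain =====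

-- B builds one column → {dataset: dtype} index in a single pass over the schemas, then filters it by
-- common_columns, instead of A's rescan of all schemas for every common column (alternative decomposition).

-- ===== PORT A =====
-- the 'dtypes' sub-dict of a schema; Python raises KeyError when the key is missing (excluded by Pre_
-- whenever the loop body runs, i.e. common_columns ≠ []), the port totalises it with [].
def detect_dtype_conflicts_py (schemas : List (String × List (String × List (String × String)))) (common_columns : List String) : List (String × List (String × String)) :=
  (common_columns.foldl (fun (conflicts : PySem.Dict String (List (String × String))) col =>
    let dtypes := schemas.foldl (fun (dtypes : PySem.Dict String String) p =>
      let d : PySem.Dict String String := PySem.Dict.mk (((PySem.Dict.mk p.2).get? "dtypes").getD [])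
      if d.contains col then dtypes.insert p.1 ((d.get? col).getD "") else dtypes)
      PySem.Dict.empty
    if (PySem.Set.ofList dtypes.values).length > 1 then conflicts.insert col dtypes.items else conflicts)
    PySem.Dict.empty).items

-- ===== PORT B =====
def detect_dtype_conflicts_py_alt (schemas : List (String × List (String × List (String × String)))) (common_columns : List String) : List (String × List (String × String)) :=
  let index : PySem.Dict String (PySem.Dict String String) := schemas.foldl (fun idx p =>
    (((PySem.Dict.mk p.2).get? "dtypes").getD []).foldl (fun idx q =>
      idx.insert q.1 ((idx.getD q.1 PySem.Dict.empty).insert p.1 q.2)) idx) PySem.Dict.empty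
  (common_columns.foldl (fun (conflicts : PySem.Dict String (List (String × String))) col =>
    let row := index.getD col PySem.Dict.empty
    if (PySem.Set.ofList row.values).length > 1 then conflicts.insert col row.items else conflicts)
    PySem.Dict.empty).items

-- ===== PRECONDITION & SPEC =====
-- Pre_ excludes (a) inputs where Python A raises KeyError: some schema is missing the 'dtypes' key while
-- common_columns is nonempty (so the loop body actually runs), and (b) association lists whose 'dtypes'
-- entry carries duplicate column keys — such lists do not represent any Python dict (the dict literal
-- collapses them), and which duplicate wins is accidental; both Pythons agree on the collapsed dict.
def Pre_detect_dtype_conflicts_py (schemas : List (String × List (String × List (String × String)))) (common_columns : List String) : Prop :=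
  (∀ p ∈ schemas, (((((PySem.Dict.mk p.2).get? "dtypes").getD []).map Prod.fst).Nodup)) ∧
  (common_columns ≠ [] → ∀ p ∈ schemas, (((PySem.Dict.mk p.2).get? "dtypes").isSome))
instance (schemas : List (String × List (String × List (String × String)))) (common_columns : List String) : Decidable (Pre_detect_dtype_conflicts_py schemas common_columns) := by unfold Pre_detect_dtype_conflicts_py; infer_instance

def pvWitness_detect_dtype_conflicts_py : (List (String × List (String × List (String × String)))) × List String :=
  ([("d1", [("dtypes", [("a", "int64"), ("b", "object")])]), ("d2", [("dtypes", [("a", "float64")])])], ["a", "b"])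

def Spec_detect_dtype_conflicts_py (schemas : List (String × List (String × List (String × String)))) (common_columns : List String) (out : List (String × List (String × String))) : Prop := out = detect_dtype_conflicts_py_alt schemas common_columns
instance (schemas : List (String × List (String × List (String × String)))) (common_columns : List String) (out : List (String × List (String × String))) : Decidable (Spec_detect_dtype_conflicts_py schemas common_columns out) := by unfold Spec_detect_dtype_conflicts_py; infer_instance

-- ===== CLAIM (what is proved, stated in full; the proofs are below) =====
def Claim_equal_detect_dtype_conflicts_py : Prop := ∀ (schemas : List (String × List (String × List (String × String)))) (common_columns : List String), Dom_detect_dtype_conflicts_py schemas common_columns → Pre_detect_dtype_conflicts_py schemas common_columns → Spec_detect_dtype_conflicts_py schemas common_columns (detect_dtype_conflicts_py schemas common_columns)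

-- ===== LEMMAS AND PROOFS =====

-- the 'dtypes' association list of one schema entry
def pvDts (p : String × List (String × List (String × String))) : List (String × String) :=
  ((PySem.Dict.mk p.2).get? "dtypes").getD []

-- B's inner per-schema fold, at a key not occurring in d, leaves the row at col untouched
theorem pvInner_getD_not_mem (name : String) (col : String) (d : List (String × String))
    (h : col ∉ d.map Prod.fst) (idx : PySem.Dict String (PySem.Dict String String)) :
    (d.foldl (fun idx q => idx.insert q.1 ((idx.getD q.1 PySem.Dict.empty).insert name q.2)) idx).getD col PySem.Dict.empty
      = idx.getD col PySem.Dict.empty := by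
  induction d generalizing idx with
  | nil => rfl
  | cons q rest ih =>
    simp only [List.map_cons, List.mem_cons, not_or] at h
    simp only [List.foldl_cons]
    rw [ih h.2, PySem.Dict.getD_insert, if_neg h.1]

-- B's inner per-schema fold updates the row at col exactly as A's membership test + lookup
theorem pvInner_getD (name : String) (col : String) (d : List (String × String))
    (hnd : (d.map Prod.fst).Nodup) (idx : PySem.Dict String (PySem.Dict String String)) :
    (d.foldl (fun idx q => idx.insert q.1 ((idx.getD q.1 PySem.Dict.empty).insert name q.2)) idx).getD col PySem.Dict.empty
      = match (PySem.Dict.mk d).get? col with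
        | some v => (idx.getD col PySem.Dict.empty).insert name v
        | none => idx.getD col PySem.Dict.empty := by
  induction d generalizing idx with
  | nil => rfl
  | cons q rest ih =>
    obtain ⟨k, v⟩ := q
    simp only [List.map_cons, List.nodup_cons] at hnd
    simp only [List.foldl_cons, PySem.Dict.get?_mk_cons]
    by_cases hq : k = col
    · subst hq
      simp only [beq_self_eq_true, if_true]
      rw [pvInner_getD_not_mem _ _ _ hnd.1, PySem.Dict.getD_insert_self]
    · have hrow : (idx.insert k ((idx.getD k PySem.Dict.empty).insert name v)).getD col PySem.Dict.empty
          = idx.getD col PySem.Dict.empty := by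
        rw [PySem.Dict.getD_insert, if_neg (fun h => hq h.symm)]
      rw [ih hnd.2, hrow]
      have hne : (k == col) = false := by simp [hq]
      rw [hne]
      simp

-- over the whole schemas list: the index's row at col is A's per-column dtypes fold
theorem pvIndex_getD (schemas : List (String × List (String × List (String × String)))) (col : String)
    (hnd : ∀ p ∈ schemas, ((pvDts p).map Prod.fst).Nodup)
    (idx : PySem.Dict String (PySem.Dict String String)) :
    (schemas.foldl (fun idx p => ((pvDts p).foldl (fun idx q =>
        idx.insert q.1 ((idx.getD q.1 PySem.Dict.empty).insert p.1 q.2)) idx)) idx).getD col PySem.Dict.empty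
      = schemas.foldl (fun (dtypes : PySem.Dict String String) p =>
          let d : PySem.Dict String String := PySem.Dict.mk (pvDts p)
          if d.contains col then dtypes.insert p.1 ((d.get? col).getD "") else dtypes)
          (idx.getD col PySem.Dict.empty) := by
  induction schemas generalizing idx with
  | nil => rfl
  | cons p rest ih =>
    simp only [List.foldl_cons]
    rw [ih (fun q hq => hnd q (List.mem_cons_of_mem _ hq))]
    congr 1
    rw [pvInner_getD _ _ _ (hnd p (List.mem_cons_self))]
    simp only [PySem.Dict.contains_eq_isSome_get?]
    cases hg : (PySem.Dict.mk (pvDts p)).get? col with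
    | none => simp
    | some v => simp

-- ===== VERDICT (by name: the statement is the Claim_ definition above) =====
theorem detect_dtype_conflicts_py_spec : Claim_equal_detect_dtype_conflicts_py := by
  intro schemas common_columns _hdom hpre
  unfold Spec_detect_dtype_conflicts_py detect_dtype_conflicts_py detect_dtype_conflicts_py_alt
  congr 1
  apply PySem.List.foldl_congr_mem
  intro conflicts col _hmem
  rw [show (fun idx p => ((((PySem.Dict.mk p.2).get? "dtypes").getD []).foldl (fun idx q =>
        PySem.Dict.insert idx q.1 ((idx.getD q.1 PySem.Dict.empty).insert p.1 q.2)) idx))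
      = (fun idx p => ((pvDts p).foldl (fun idx q =>
        PySem.Dict.insert idx q.1 ((idx.getD q.1 PySem.Dict.empty).insert p.1 q.2)) idx)) from rfl]
  rw [pvIndex_getD schemas col (fun p hp => hpre.1 p hp)]
  rfl
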